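-- pv_equiv track=rewrite | github.com/VarshneyPranjal/python-for-devops | day-04/log_analyzer.py | count_logs
-- ===== SOURCE A (Python) =====
-- def count_logs(logs):
--     log_count = {
--         "INFO" : 0,
--         "WARNING" : 0,
--         "ERROR" : 0
--     }
--     # pdb.set_trace()           #way to pause program execution and enter an interactive debugging session
--     for log in logs:
--         if "INFO" in log :
--             log_count.update({"INFO" : log_count["INFO"] + 1})
--         elif "WARNING" in log:
--             log_count.update({"WARNING" : log_count["WARNING"] + 1})
--         elif "ERROR" in log:
--             log_count.update({"ERROR" :log_count["ERROR"] + 1})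
--         else :
--             pass
--     return log_count
-- ===== SOURCE B (Python) =====
-- def count_logs(logs):
--     # Three independent level-count passes; higher-precedence matches are
--     # excluded inside each predicate, so no per-log dispatch is needed.
--     return {
--         "INFO": sum(1 for log in logs if "INFO" in log),
--         "WARNING": sum(1 for log in logs if "WARNING" in log and "INFO" not in log),
--         "ERROR": sum(1 for log in logs
--                      if "ERROR" in log and "WARNING" not in log and "INFO" not in log),
--     }
-- ===== Notes on version B (the rewrite author's own statement) =====
-- stated objective: alternative
-- what changed: Replaces A's single loop over logs with a mutable if/elif-updated dict by three independent filtered counting passes, one per severity, each excluding higher-precedence levels in its predicate; the result dict is built directly from the three counts with no accumulator.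
import Mathlib
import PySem

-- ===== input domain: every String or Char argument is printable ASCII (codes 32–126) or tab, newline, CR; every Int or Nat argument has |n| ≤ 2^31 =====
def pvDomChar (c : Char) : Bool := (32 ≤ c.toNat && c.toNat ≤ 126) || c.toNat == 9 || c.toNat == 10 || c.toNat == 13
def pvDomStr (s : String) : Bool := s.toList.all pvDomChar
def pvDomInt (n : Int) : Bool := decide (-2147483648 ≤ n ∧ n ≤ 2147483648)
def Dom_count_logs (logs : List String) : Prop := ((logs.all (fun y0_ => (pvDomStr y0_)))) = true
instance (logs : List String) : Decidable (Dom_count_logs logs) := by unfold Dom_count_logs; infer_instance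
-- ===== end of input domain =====

-- B replaces A's single accumulator loop by three independent filtered counting passes (one per level, excluding higher-precedence levels); same cost, no speed claim.

-- ===== PORT A =====
-- loop body of A's for-loop (if/elif chain updating the dict in place)
def pvBodyA (d : PySem.Dict String Int) (log : String) : PySem.Dict String Int :=
  if PySem.Str.isIn "INFO" log then d.insert "INFO" (d.getD "INFO" 0 + 1)
  else if PySem.Str.isIn "WARNING" log then d.insert "WARNING" (d.getD "WARNING" 0 + 1)
  else if PySem.Str.isIn "ERROR" log then d.insert "ERROR" (d.getD "ERROR" 0 + 1)
  else d

def count_logs (logs : List String) : List (String × Int) :=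
  (logs.foldl pvBodyA
    (((PySem.Dict.empty.insert "INFO" (0 : Int)).insert "WARNING" 0).insert "ERROR" 0)).items

-- ===== PORT B =====
-- sum(1 for log in logs if <predicate>) for each level, as a countP over logs
def count_logs_alt (logs : List String) : List (String × Int) :=
  [("INFO", (logs.countP (fun log => PySem.Str.isIn "INFO" log) : Int)),
   ("WARNING", (logs.countP (fun log =>
      PySem.Str.isIn "WARNING" log && !PySem.Str.isIn "INFO" log) : Int)),
   ("ERROR", (logs.countP (fun log =>
      PySem.Str.isIn "ERROR" log && !PySem.Str.isIn "WARNING" log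
        && !PySem.Str.isIn "INFO" log) : Int))]

-- ===== PRECONDITION & SPEC =====
def Spec_count_logs (logs : List String) (out : List (String × Int)) : Prop := out = count_logs_alt logs
instance (logs : List String) (out : List (String × Int)) : Decidable (Spec_count_logs logs out) := by unfold Spec_count_logs; infer_instance

-- ===== CLAIM (what is proved, stated in full; the proofs are below) =====
def Claim_equal_count_logs : Prop := ∀ (logs : List String), Dom_count_logs logs → Spec_count_logs logs (count_logs logs)

-- ===== LEMMAS AND PROOFS =====

-- the three disjoint per-log predicates induced by A's if/elif chain
def pI (log : String) : Bool := PySem.Str.isIn "INFO" log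
def pW (log : String) : Bool := !PySem.Str.isIn "INFO" log && PySem.Str.isIn "WARNING" log
def pE (log : String) : Bool := !PySem.Str.isIn "INFO" log && !PySem.Str.isIn "WARNING" log && PySem.Str.isIn "ERROR" log

lemma A_inv (logs : List String) (i w e : Int) :
    logs.foldl pvBodyA (PySem.Dict.mk [("INFO",i),("WARNING",w),("ERROR",e)]) =
      PySem.Dict.mk [("INFO", i + (logs.countP pI : Int)),
                     ("WARNING", w + (logs.countP pW : Int)),
                     ("ERROR", e + (logs.countP pE : Int))] := by
  induction logs generalizing i w e with
  | nil => simp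
  | cons log rest ih =>
    have hstep : pvBodyA (PySem.Dict.mk [("INFO",i),("WARNING",w),("ERROR",e)]) log
        = PySem.Dict.mk [("INFO", i + if pI log then 1 else 0),
                         ("WARNING", w + if pW log then 1 else 0),
                         ("ERROR", e + if pE log then 1 else 0)] := by
      apply PySem.Dict.ext
      cases h1 : PySem.Str.isIn "INFO" log <;>
        cases h2 : PySem.Str.isIn "WARNING" log <;>
        cases h3 : PySem.Str.isIn "ERROR" log <;>
        (simp at h1 h2 h3 ;
         simp [pvBodyA, pI, pW, pE, h1, h2, h3,
           PySem.Dict.items_insert, PySem.Dict.contains_mk,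
           PySem.Dict.getD_eq_get?_getD, PySem.Dict.get?_mk_cons])
    rw [List.foldl_cons, hstep, ih]
    apply PySem.Dict.ext
    simp only [List.countP_cons, List.cons.injEq, Prod.mk.injEq, true_and, and_true]
    split_ifs <;> push_cast <;> omega

-- ===== VERDICT (by name: the statement is the Claim_ definition above) =====
theorem count_logs_spec : Claim_equal_count_logs := by
  intro logs _
  show count_logs logs = count_logs_alt logs
  have hinit : (((PySem.Dict.empty.insert "INFO" (0 : Int)).insert "WARNING" 0).insert "ERROR" 0)
      = PySem.Dict.mk [("INFO",(0:Int)),("WARNING",0),("ERROR",0)] := by decide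
  have hI : logs.countP pI = logs.countP (fun log =>
      PySem.Str.isIn "INFO" log) :=
    List.countP_congr (fun x _ => by simp [pI])
  have hW : logs.countP pW = logs.countP (fun log =>
      PySem.Str.isIn "WARNING" log && !PySem.Str.isIn "INFO" log) :=
    List.countP_congr (fun x _ => by simp [pW, Bool.and_comm])
  have hE : logs.countP pE = logs.countP (fun log =>
      PySem.Str.isIn "ERROR" log && !PySem.Str.isIn "WARNING" log
        && !PySem.Str.isIn "INFO" log) :=
    List.countP_congr (fun x _ => by
      simp [pE]; tauto)
  simp only [count_logs, count_logs_alt, hinit, A_inv, ← hI, ← hW, ← hE]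
  simp
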